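-- pv_equiv track=rewrite | github.com/whoiskiwi/MG_GAT | src/data/features.py | _build_category_vocab
-- ===== SOURCE A (Python) =====
-- def _build_category_vocab(biz_list: list) -> list:
--     """Collect all category tokens across PA businesses."""
--     cats = set()
--     for b in biz_list:
--         for c in (b.get('categories') or '').split(','):
--             c = c.strip()
--             if c:
--                 cats.add(c)
--     return sorted(cats)
-- ===== SOURCE B (Python) =====
-- def _build_category_vocab(biz_list: list) -> list:
--     """Collect all category tokens across PA businesses."""
--     # Flat list of all non-empty stripped tokens (with duplicates), then
--     # sort once and deduplicate adjacent equal values in a single pass.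
--     tokens = [t for b in biz_list
--               for t in map(str.strip, (b.get('categories') or '').split(','))
--               if t]
--     tokens = sorted(tokens)
--     vocab = []
--     for t in tokens:
--         if not vocab or vocab[-1] != t:
--             vocab.append(t)
--     return vocab
-- ===== Notes on version B (the rewrite author's own statement) =====
-- stated objective: alternative
-- what changed: B maintains no set: it collects every non-empty stripped token into a flat list (duplicates kept), sorts it once, and deduplicates adjacent equal values in one final pass, instead of hash-deduplicating into a set during the scan and sorting the set.
import Mathlib
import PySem

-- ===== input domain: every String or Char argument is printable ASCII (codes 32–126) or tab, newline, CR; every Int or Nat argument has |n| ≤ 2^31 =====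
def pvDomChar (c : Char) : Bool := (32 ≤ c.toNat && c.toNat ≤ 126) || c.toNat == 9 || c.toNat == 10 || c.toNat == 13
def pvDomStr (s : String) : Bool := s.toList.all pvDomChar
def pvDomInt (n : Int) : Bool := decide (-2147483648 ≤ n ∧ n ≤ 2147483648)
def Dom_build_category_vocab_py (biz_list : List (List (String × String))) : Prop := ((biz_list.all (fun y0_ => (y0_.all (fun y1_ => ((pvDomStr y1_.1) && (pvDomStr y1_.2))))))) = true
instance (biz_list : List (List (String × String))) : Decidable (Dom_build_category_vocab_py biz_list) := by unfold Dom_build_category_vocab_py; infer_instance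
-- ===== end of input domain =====

-- B collects all non-empty stripped tokens into a flat list, sorts once, and dedupes
-- adjacent equal values in one pass, instead of A's set-dedup-during-scan then sort.


-- ===== PORT A =====
-- (b.get('categories') or '') : empty/missing both give ""
def bcvCatsStr (b : List (String × String)) : String :=
  match (PySem.Dict.mk b).get? "categories" with
  | none => ""
  | some v => if v = "" then "" else v

def build_category_vocab_py (biz_list : List (List (String × String))) : List String :=
  let cats : PySem.Set String :=
    biz_list.foldl (fun cats b =>
      ((PySem.Str.split? (bcvCatsStr b) ",").getD []).foldl
        (fun cats c =>
          let c := PySem.Str.strip c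
          if c ≠ "" then PySem.Set.add cats c else cats) cats)
      PySem.Set.empty
  PySem.List.sorted cats (fun x => x) false

-- ===== PORT B =====
-- the token comprehension: non-empty stripped pieces of one business's categories
def bcvTokensOf (b : List (String × String)) : List String :=
  (((PySem.Str.split? (bcvCatsStr b) ",").getD []).map PySem.Str.strip).filter (fun t => t ≠ "")

def build_category_vocab_py_alt (biz_list : List (List (String × String))) : List String :=
  let tokens := PySem.List.sorted (biz_list.flatMap bcvTokensOf) (fun x => x) false
  tokens.foldl
    (fun vocab t =>
      if vocab = [] ∨ PySem.List.pyGet? vocab (-1) ≠ some t then vocab ++ [t] else vocab)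
    []

-- ===== PRECONDITION & SPEC =====
def Spec_build_category_vocab_py (biz_list : List (List (String × String))) (out : List String) : Prop := out = build_category_vocab_py_alt biz_list
instance (biz_list : List (List (String × String))) (out : List String) : Decidable (Spec_build_category_vocab_py biz_list out) := by unfold Spec_build_category_vocab_py; infer_instance

-- ===== CLAIM (what is proved, stated in full; the proofs are below) =====
def Claim_equal_build_category_vocab_py : Prop := ∀ (biz_list : List (List (String × String))), Dom_build_category_vocab_py biz_list → Spec_build_category_vocab_py biz_list (build_category_vocab_py biz_list)

-- ===== LEMMAS AND PROOFS =====

-- A's inner loop is Set.add folded over the filtered/stripped token list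
theorem bcv_inner_fold (cs : List String) (s : PySem.Set String) :
    cs.foldl (fun s c => let c := PySem.Str.strip c;
      if c ≠ "" then PySem.Set.add s c else s) s
      = ((cs.map PySem.Str.strip).filter (fun t => t ≠ "")).foldl PySem.Set.add s := by
  induction cs generalizing s with
  | nil => rfl
  | cons c rest ih =>
    simp only [List.map_cons, List.filter_cons]
    by_cases h : PySem.Str.strip c = ""
    · rw [List.foldl_cons]
      simp only [h, if_neg (by simp : ¬("" ≠ ""))]
      rw [ih]
      simp
    · rw [List.foldl_cons]
      simp only [if_pos h]
      rw [ih, if_pos (by simpa using h)]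
      rfl

-- A's outer loop is Set.add folded over the flattened token list
theorem bcv_outer_fold (bs : List (List (String × String))) (s : PySem.Set String) :
    bs.foldl (fun cats b =>
      ((PySem.Str.split? (bcvCatsStr b) ",").getD []).foldl
        (fun cats c => let c := PySem.Str.strip c;
          if c ≠ "" then PySem.Set.add cats c else cats) cats) s
      = (bs.flatMap bcvTokensOf).foldl PySem.Set.add s := by
  induction bs generalizing s with
  | nil => rfl
  | cons b rest ih =>
    simp only [List.foldl_cons, List.flatMap_cons, List.foldl_append]
    rw [bcv_inner_fold, ih]
    rfl

-- every element of a strictly increasing list is ≤ its last element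
theorem bcv_le_getLast {l : List String} (hp : l.Pairwise (· < ·)) (h : l ≠ [])
    {a : String} (ha : a ∈ l) : a ≤ l.getLast h := by
  induction l with
  | nil => exact absurd rfl h
  | cons x rest ih =>
    rcases List.mem_cons.mp ha with rfl | ha'
    · cases rest with
      | nil => simp [List.getLast]
      | cons y t =>
        have hx : a < (y :: t).getLast (by simp) := by
          rcases List.pairwise_cons.mp hp with ⟨hall, _⟩
          exact hall _ (List.getLast_mem _)
        simpa [List.getLast_cons] using le_of_lt hx
    · have hrest : rest ≠ [] := by rintro rfl; simp at ha'
      have := ih (List.pairwise_cons.mp hp).2 hrest ha'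
      simpa [List.getLast_cons hrest] using this

-- loop invariant for B's adjacent-dedup pass
theorem bcv_dedup_fold (l : List String) (acc : List String)
    (hacc : acc.Pairwise (· < ·))
    (hl : l.Pairwise (· ≤ ·))
    (hle : ∀ a ∈ acc, ∀ x ∈ l, a ≤ x) :
    (l.foldl (fun vocab t =>
        if vocab = [] ∨ PySem.List.pyGet? vocab (-1) ≠ some t then vocab ++ [t] else vocab)
      acc).Pairwise (· < ·) ∧
    (∀ y, y ∈ l.foldl (fun vocab t =>
        if vocab = [] ∨ PySem.List.pyGet? vocab (-1) ≠ some t then vocab ++ [t] else vocab)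
      acc ↔ y ∈ acc ∨ y ∈ l) := by
  induction l generalizing acc with
  | nil => exact ⟨hacc, fun y => by simp⟩
  | cons t rest ih =>
    have hrest : rest.Pairwise (· ≤ ·) := (List.pairwise_cons.mp hl).2
    have ht_rest : ∀ x ∈ rest, t ≤ x := (List.pairwise_cons.mp hl).1
    simp only [List.foldl_cons]
    by_cases hc : acc = [] ∨ PySem.List.pyGet? acc (-1) ≠ some t
    · rw [if_pos hc]
      have hne : acc ++ [t] ≠ [] := by simp
      have hlt : ∀ a ∈ acc, a < t := by
        intro a ha
        have hane : acc ≠ [] := by rintro rfl; simp at ha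
        have hlast : PySem.List.pyGet? acc (-1) = some (acc.getLast hane) := by
          rw [PySem.List.pyGet?_neg_one, List.getLast?_eq_some_getLast]
        have hlastne : acc.getLast hane ≠ t := by
          rcases hc with h | h
          · exact absurd h hane
          · intro he; exact h (by rw [hlast, he])
        have h1 : a ≤ acc.getLast hane := bcv_le_getLast hacc hane ha
        have h2 : acc.getLast hane ≤ t := hle _ (List.getLast_mem hane) t (by simp)
        exact lt_of_le_of_lt h1 (lt_of_le_of_ne h2 hlastne)
      have hacc' : (acc ++ [t]).Pairwise (· < ·) := by
        rw [List.pairwise_append]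
        exact ⟨hacc, List.pairwise_singleton _ _, by simpa using hlt⟩
      have hle' : ∀ a ∈ acc ++ [t], ∀ x ∈ rest, a ≤ x := by
        intro a ha x hx
        rcases List.mem_append.mp ha with ha | ha
        · exact hle a ha x (List.mem_cons_of_mem _ hx)
        · simp at ha; subst ha; exact ht_rest x hx
      obtain ⟨hp, hm⟩ := ih (acc ++ [t]) hacc' hrest hle'
      refine ⟨hp, fun y => ?_⟩
      rw [hm]; simp [or_assoc, or_comm, or_left_comm]
    · rw [if_neg hc]
      push Not at hc
      obtain ⟨hane, hlast⟩ := hc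
      have htmem : t ∈ acc := by
        have := PySem.List.pyGet?_neg_one (xs := acc)
        rw [this] at hlast
        exact List.mem_of_getLast? hlast
      have hle' : ∀ a ∈ acc, ∀ x ∈ rest, a ≤ x :=
        fun a ha x hx => hle a ha x (List.mem_cons_of_mem _ hx)
      obtain ⟨hp, hm⟩ := ih acc hacc hrest hle'
      refine ⟨hp, fun y => ?_⟩
      rw [hm]
      constructor
      · rintro (h | h)
        · exact Or.inl h
        · exact Or.inr (List.mem_cons_of_mem _ h)
      · rintro (h | h)
        · exact Or.inl h
        · rcases List.mem_cons.mp h with rfl | h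
          · exact Or.inl htmem
          · exact Or.inr h

-- ===== VERDICT (by name: the statement is the Claim_ definition above) =====
theorem build_category_vocab_py_spec : Claim_equal_build_category_vocab_py := by
  intro biz_list _
  unfold Spec_build_category_vocab_py build_category_vocab_py build_category_vocab_py_alt
  set T := biz_list.flatMap bcvTokensOf with hT
  have hA : biz_list.foldl (fun cats b =>
      ((PySem.Str.split? (bcvCatsStr b) ",").getD []).foldl
        (fun cats c => let c := PySem.Str.strip c;
          if c ≠ "" then PySem.Set.add cats c else cats) cats)
      PySem.Set.empty = PySem.Set.ofList T := by
    rw [bcv_outer_fold]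
    rw [PySem.Set.ofList_eq_foldl]
    rfl
  have hsortT : (PySem.List.sorted T (fun x => x) false).Pairwise (· ≤ ·) := by
    simpa using PySem.List.sorted_pairwise (xs := T) (key := fun x => x)
  obtain ⟨hp, hm⟩ := bcv_dedup_fold (PySem.List.sorted T (fun x => x) false) []
    (List.Pairwise.nil) hsortT (by simp)
  set R := (PySem.List.sorted T (fun x => x) false).foldl
      (fun vocab t =>
        if vocab = [] ∨ PySem.List.pyGet? vocab (-1) ≠ some t then vocab ++ [t] else vocab)
      [] with hR
  have hmem : ∀ y, y ∈ R ↔ y ∈ T := by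
    intro y
    rw [hm y]
    simp [PySem.List.mem_sorted]
  have hnodupR : R.Nodup := hp.imp (fun h => ne_of_lt h)
  have hperm : R.Perm (PySem.Set.ofList T) := by
    rw [← PySem.List.dedup_eq_ofList]
    refine (List.perm_ext_iff_of_nodup hnodupR (PySem.List.nodup_dedup T)).mpr ?_
    intro a
    rw [hmem a, PySem.List.mem_dedup]
  have heq := PySem.List.sorted_eq_of_perm_of_pairwise_lt (xs := PySem.Set.ofList T)
      (ys := R) (key := fun x => x) hperm (by simpa using hp)
  simp only [hA, heq]
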